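-- pv_equiv track=rewrite | github.com/vayalet/Exercise-performance-DL | utils/tools.py | compute_rep_count
-- ===== SOURCE A (Python) =====
-- from collections import Counter
--
-- def compute_rep_count(labels):
--     """
--     Counts the number of repetitions for each exercise segment using majority voting
--     and tracks the start and end indices of each segment.
--
--     Parameters:
--         labels (list): A list containing frame-by-frame labels for a CV fold.
--     Returns:
--         tuple:
--             rep_count (dict): A dictionary where keys are exercise labels and values
--                               are the count of repetitions.
--             rep_ids (dict): A dictionary where keys are exercise labels and
--                                  values are lists of (start, end) indices for each segment.
--     """
--     rep_count = {}
--     rep_ids = {}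
--     window_size = 30 # Size of the window used for majority voting.
--     current_segment = None
--     start_idx = None
--
--     for idx in range(len(labels)):  # Iterate through each label
--         # Determine the majority label for the current window
--         start_window = max(0, idx - window_size // 2)
--         end_window = min(len(labels), idx + window_size // 2 + 1)
--         majority_label = Counter(labels[start_window:end_window]).most_common(1)[0][0]
--
--         # Detect segment changes based on majority voting
--         if majority_label != current_segment:
--             if current_segment is not None:  # Save the previous segment
--                 if current_segment not in rep_count:
--                     rep_count[current_segment] = 0
--                     rep_ids[current_segment] = []
--                 rep_count[current_segment] += 1
--                 rep_ids[current_segment].append((start_idx, idx - 1))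
--
--             # Update to the new segment
--             current_segment = majority_label
--             start_idx = idx
--
--     # Handle the last segment
--     if current_segment is not None:
--         if current_segment not in rep_count:
--             rep_count[current_segment] = 0
--             rep_ids[current_segment] = []
--         rep_count[current_segment] += 1
--         rep_ids[current_segment].append((start_idx, len(labels) - 1))
--
--     return rep_count, rep_ids
-- ===== SOURCE B (Python) =====
-- from collections import Counter
--
--
-- def _runs(ms):
--     """Split ms into maximal runs of equal consecutive values, as (value, length) pairs."""
--     runs = []
--     n = len(ms)
--     i = 0
--     while i < n:
--         j = i + 1
--         while j < n and ms[j] == ms[i]: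
--             j += 1
--         runs.append((ms[i], j - i))
--         i = j
--     return runs
--
--
-- def compute_rep_count(labels):
--     n = len(labels)
--     # Pass 1: the per-frame majority label over the same +/-15 window A uses.
--     majorities = [Counter(labels[max(0, i - 15):min(n, i + 16)]).most_common(1)[0][0]
--                   for i in range(n)]
--     # Pass 2: split the majority sequence into maximal runs, then fold the runs
--     # into the two dictionaries while tracking the absolute position.
--     rep_count = {}
--     rep_ids = {}
--     pos = 0
--     for lab, k in _runs(majorities):
--         rep_count[lab] = rep_count.get(lab, 0) + 1
--         rep_ids.setdefault(lab, []).append((pos, pos + k - 1))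
--         pos += k
--     return rep_count, rep_ids
-- ===== Notes on version B (the rewrite author's own statement) =====
-- stated objective: alternative
-- what changed: A's single fused loop (state machine carrying current_segment/start_idx and updating the dicts on each detected change) is replaced by two separate passes: first the per-frame majority sequence is materialised, then it is split into maximal runs by a run-length scanner and the runs are folded into the two dictionaries.
import Mathlib
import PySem

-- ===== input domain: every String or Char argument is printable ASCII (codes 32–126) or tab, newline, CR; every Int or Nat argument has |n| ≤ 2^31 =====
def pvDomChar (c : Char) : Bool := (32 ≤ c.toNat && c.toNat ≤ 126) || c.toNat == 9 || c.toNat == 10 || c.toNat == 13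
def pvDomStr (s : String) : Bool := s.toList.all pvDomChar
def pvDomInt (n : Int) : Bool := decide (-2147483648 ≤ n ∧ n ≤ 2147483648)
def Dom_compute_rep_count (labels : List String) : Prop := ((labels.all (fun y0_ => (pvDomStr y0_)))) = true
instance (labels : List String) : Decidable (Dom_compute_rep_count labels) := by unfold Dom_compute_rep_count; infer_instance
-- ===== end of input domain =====

-- B re-decomposes A's fused state-machine into two passes (per-frame majorities, then
-- maximal-run grouping folded into the dicts); same cost, objective: alternative decomposition.

-- ===== PORT A =====

-- state of A's loop: (rep_count, rep_ids, current_segment, start_idx)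
abbrev PvStA :=
  (PySem.Dict String Int) × (PySem.Dict String (List (Int × Int))) × Option String × Option Int

-- Counter(...).most_common(1)[0][0]: first key of maximal count in insertion order
def pvFirstMax (k : String) (v : Int) : List (String × Int) → String
  | [] => k
  | (k', v') :: t => if v' > v then pvFirstMax k' v' t else pvFirstMax k v t

-- "" is unreachable here: for idx < len(labels) the window always contains labels[idx]
def pvMostCommon1 : List (String × Int) → String
  | [] => ""
  | (k, v) :: t => pvFirstMax k v t

-- Counter(labels[max(0, idx - 30//2):min(len(labels), idx + 30//2 + 1)]).most_common(1)[0][0]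
def pvMajority (labels : List String) (idx : Nat) : String :=
  let start_window : Int := max 0 ((idx : Int) - PySem.Int.floordiv 30 2)
  let end_window : Int := min (PySem.List.len labels) ((idx : Int) + PySem.Int.floordiv 30 2 + 1)
  pvMostCommon1 (PySem.Dict.counter (PySem.List.slice labels (some start_window) (some end_window))).items

-- A's duplicated "save the segment" block
def pvSaveA (rc : PySem.Dict String Int) (ri : PySem.Dict String (List (Int × Int)))
    (c : String) (s e : Int) :
    (PySem.Dict String Int) × (PySem.Dict String (List (Int × Int))) :=
  let p := if rc.contains c = false then (rc.insert c 0, ri.insert c ([] : List (Int × Int)))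
           else (rc, ri)
  (p.1.insert c (p.1.getD c 0 + 1), p.2.insert c (p.2.getD c [] ++ [(s, e)]))

-- one iteration of A's for-loop
def pvStepA (labels : List String) (st : PvStA) (idx : Nat) : PvStA :=
  let (rc, ri, current_segment, start_idx) := st
  let majority_label := pvMajority labels idx
  if some majority_label ≠ current_segment then
    match current_segment with
    | none => (rc, ri, some majority_label, some (idx : Int))
    | some c =>
      let p := pvSaveA rc ri c (start_idx.getD 0) ((idx : Int) - 1)
      (p.1, p.2, some majority_label, some (idx : Int))
  else st

-- "Handle the last segment"
def pvFinishA (st : PvStA) (e : Int) :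
    (PySem.Dict String Int) × (PySem.Dict String (List (Int × Int))) :=
  match st with
  | (rc, ri, none, _) => (rc, ri)
  | (rc, ri, some c, start_idx) => pvSaveA rc ri c (start_idx.getD 0) e

def compute_rep_count (labels : List String) :
    (List (String × Int)) × (List (String × List (Int × Int))) :=
  let st := (List.range labels.length).foldl (pvStepA labels)
    (PySem.Dict.empty, PySem.Dict.empty, none, none)
  let p := pvFinishA st (PySem.List.len labels - 1)
  (p.1.items, p.2.items)

-- ===== PORT B =====

-- inner while of _runs: how many leading elements of the current tail still equal ms[i]
def pvPrefEq (x : String) : List String → Nat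
  | [] => 0
  | y :: t => if y = x then pvPrefEq x t + 1 else 0

-- _runs(ms): maximal runs of equal consecutive values, as (value, length) pairs.
-- The outer while-loop's position i is represented by the remaining suffix ms[i:];
-- pvPrefEq is the inner while (j - i - 1 extra equal elements), and i = j is the drop.
def pvRuns : List String → List (String × Nat)
  | [] => []
  | x :: t =>
    let k := pvPrefEq x t + 1
    (x, k) :: pvRuns (t.drop (k - 1))
termination_by ms => ms.length
decreasing_by simp

-- one iteration of B's for-loop over the runs; state (rep_count, rep_ids, pos)
def pvStepB (st : (PySem.Dict String Int) × (PySem.Dict String (List (Int × Int))) × Nat)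
    (r : String × Nat) :
    (PySem.Dict String Int) × (PySem.Dict String (List (Int × Int))) × Nat :=
  let (rep_count, rep_ids, pos) := st
  let (lab, k) := r
  (rep_count.insert lab (rep_count.getD lab 0 + 1),
   rep_ids.modify lab [] (· ++ [((pos : Int), (pos : Int) + (k : Int) - 1)]),
   pos + k)

def compute_rep_count_alt (labels : List String) :
    (List (String × Int)) × (List (String × List (Int × Int))) :=
  let n := labels.length
  let majorities := (List.range n).map (pvMajority labels)
  let st := (pvRuns majorities).foldl pvStepB (PySem.Dict.empty, PySem.Dict.empty, 0)
  (st.1.items, st.2.1.items)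

-- ===== PRECONDITION & SPEC =====
def Spec_compute_rep_count (labels : List String) (out : (List (String × Int)) × (List (String × List (Int × Int)))) : Prop := out = compute_rep_count_alt labels
instance (labels : List String) (out : (List (String × Int)) × (List (String × List (Int × Int)))) : Decidable (Spec_compute_rep_count labels out) := by unfold Spec_compute_rep_count; infer_instance

-- ===== CLAIM (what is proved, stated in full; the proofs are below) =====
def Claim_equal_compute_rep_count : Prop := ∀ (labels : List String), Dom_compute_rep_count labels → Spec_compute_rep_count labels (compute_rep_count labels)

-- ===== LEMMAS AND PROOFS =====

-- B's per-run dict update, as a pair-valued helper (rfl-equal to pvStepB's first two components)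
def pvSaveB (rc : PySem.Dict String Int) (ri : PySem.Dict String (List (Int × Int)))
    (lab : String) (p : Int × Int) :
    (PySem.Dict String Int) × (PySem.Dict String (List (Int × Int))) :=
  (rc.insert lab (rc.getD lab 0 + 1), ri.modify lab [] (· ++ [p]))

-- A's loop decoupled from labels: it consumes the precomputed majority sequence
def pvStepCore (st : PvStA) (idx : Nat) (m : String) : PvStA :=
  let (rc, ri, current_segment, _start_idx) := st
  if some m ≠ current_segment then
    match current_segment with
    | none => (rc, ri, some m, some (idx : Int))
    | some c =>
      let p := pvSaveA rc ri c ((st.2.2.2).getD 0) ((idx : Int) - 1)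
      (p.1, p.2, some m, some (idx : Int))
  else st

def pvLoopA : PvStA → Nat → List String → PvStA
  | st, _, [] => st
  | st, i, m :: t => pvLoopA (pvStepCore st i m) (i + 1) t

def pvLoopB : (PySem.Dict String Int) × (PySem.Dict String (List (Int × Int))) → Nat →
    List (String × Nat) → (PySem.Dict String Int) × (PySem.Dict String (List (Int × Int)))
  | st, _, [] => st
  | st, pos, (lab, k) :: rs =>
    pvLoopB (pvSaveB st.1 st.2 lab ((pos : Int), (pos : Int) + (k : Int) - 1)) (pos + k) rs

lemma pvStepA_eq (labels : List String) (st : PvStA) (idx : Nat) :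
    pvStepA labels st idx = pvStepCore st idx (pvMajority labels idx) := by
  obtain ⟨rc, ri, cs, si⟩ := st; rfl

lemma pvBRA (labels : List String) :
    ∀ (k i : Nat) (st : PvStA),
      (List.range' i k).foldl (pvStepA labels) st
        = pvLoopA st i ((List.range' i k).map (pvMajority labels)) := by
  intro k
  induction k with
  | zero => intro i st; simp [pvLoopA]
  | succ k ih =>
    intro i st
    rw [List.range'_succ]
    simp only [List.foldl_cons, List.map_cons, pvLoopA]
    rw [pvStepA_eq, ih]

lemma pvBRB : ∀ (rs : List (String × Nat)) (rc : PySem.Dict String Int)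
    (ri : PySem.Dict String (List (Int × Int))) (pos : Nat),
    ((rs.foldl pvStepB (rc, ri, pos)).1, (rs.foldl pvStepB (rc, ri, pos)).2.1)
      = pvLoopB (rc, ri) pos rs := by
  intro rs
  induction rs with
  | nil => intro rc ri pos; simp [pvLoopB]
  | cons r rs ih =>
    obtain ⟨lab, k⟩ := r
    intro rc ri pos
    simp only [List.foldl_cons, pvStepB, pvLoopB, pvSaveB]
    exact ih _ _ _

lemma pvSaveAB (rc : PySem.Dict String Int) (ri : PySem.Dict String (List (Int × Int)))
    (c : String) (s e : Int) (h : ri.contains c = rc.contains c) :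
    pvSaveA rc ri c s e = pvSaveB rc ri c (s, e) := by
  unfold pvSaveA pvSaveB PySem.Dict.modify
  by_cases hc : rc.contains c
  · simp [hc]
  · simp only [Bool.not_eq_true] at hc
    rw [hc] at h
    simp only [hc, if_true]
    simp only [Prod.mk.injEq]
    refine ⟨?_, ?_⟩
    · rw [PySem.Dict.getD_insert_self, PySem.Dict.insert_insert_self,
        PySem.Dict.getD_of_not_contains rc 0 hc]
    · rw [PySem.Dict.getD_insert_self, PySem.Dict.insert_insert_self,
        PySem.Dict.getD_of_not_contains ri [] h]

lemma pvSaveB_keys (rc : PySem.Dict String Int) (ri : PySem.Dict String (List (Int × Int)))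
    (c : String) (p : Int × Int) (H : ∀ k, rc.contains k = ri.contains k) :
    ∀ k, (pvSaveB rc ri c p).1.contains k = (pvSaveB rc ri c p).2.contains k := by
  intro k
  simp [pvSaveB, PySem.Dict.modify, PySem.Dict.contains_insert, H k]

lemma pvPrefEq_le (x : String) (t : List String) : pvPrefEq x t ≤ t.length := by
  induction t with
  | nil => simp [pvPrefEq]
  | cons y t ih =>
    simp only [pvPrefEq, List.length_cons]
    split <;> omega

lemma pvPrefEq_take (x : String) (t : List String) :
    ∀ y ∈ t.take (pvPrefEq x t), y = x := by
  induction t with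
  | nil => simp
  | cons y t ih =>
    by_cases h : y = x
    · simp only [pvPrefEq, if_pos h, List.take_succ_cons]
      intro z hz
      rcases List.mem_cons.mp hz with hz | hz
      · exact hz.trans h
      · exact ih z hz
    · simp [pvPrefEq, h]

lemma pvPrefEq_drop_head (x : String) (t : List String) :
    (t.drop (pvPrefEq x t)).head? ≠ some x := by
  induction t with
  | nil => simp
  | cons y t ih =>
    by_cases h : y = x
    · simpa [pvPrefEq, h] using ih
    · simp [pvPrefEq, h]

lemma pvRuns_cons (x : String) (t : List String) :
    pvRuns (x :: t) = (x, pvPrefEq x t + 1) :: pvRuns (t.drop (pvPrefEq x t)) := by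
  rw [pvRuns]; simp

lemma pvSkip (c : String) : ∀ (u v : List String) (i : Nat) (rc : PySem.Dict String Int)
    (ri : PySem.Dict String (List (Int × Int))) (s : Option Int),
    (∀ y ∈ u, y = c) →
    pvLoopA (rc, ri, some c, s) i (u ++ v) = pvLoopA (rc, ri, some c, s) (i + u.length) v := by
  intro u
  induction u with
  | nil => intro v i rc ri s _; simp
  | cons y u ih =>
    intro v i rc ri s hall
    have hy : y = c := hall y (List.mem_cons_self ..)
    subst hy
    simp only [List.cons_append, pvLoopA, pvStepCore]
    have h1 : ¬ (some y ≠ some y) := by simp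
    simp only [if_neg h1]
    rw [ih _ _ _ _ _ (fun z hz => hall z (List.mem_cons_of_mem _ hz))]
    have h2 : i + 1 + u.length = i + (y :: u).length := by simp; omega
    rw [h2]

lemma pvML : ∀ (N : Nat) (t : List String) (i : Nat) (rc : PySem.Dict String Int)
    (ri : PySem.Dict String (List (Int × Int))) (c : String) (s : Int),
    t.length ≤ N → (∀ k, rc.contains k = ri.contains k) →
    pvFinishA (pvLoopA (rc, ri, some c, some s) i t) (((i + t.length : Nat) : Int) - 1)
      = pvLoopB (pvSaveB rc ri c (s, ((i + pvPrefEq c t : Nat) : Int) - 1))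
          (i + pvPrefEq c t) (pvRuns (t.drop (pvPrefEq c t))) := by
  intro N
  induction N with
  | zero =>
    intro t i rc ri c s hN H
    have ht : t = [] := List.eq_nil_of_length_eq_zero (Nat.le_zero.mp hN)
    subst ht
    simp only [pvLoopA, pvPrefEq, List.drop_nil, pvRuns, pvLoopB, List.length_nil, Nat.add_zero]
    simp only [pvFinishA, Option.getD_some]
    exact pvSaveAB rc ri c s _ ((H c).symm)
  | succ N ih =>
    intro t i rc ri c s hN H
    have hpele := pvPrefEq_le c t
    have hskip : pvLoopA (rc, ri, some c, some s) i t
        = pvLoopA (rc, ri, some c, some s) (i + pvPrefEq c t) (t.drop (pvPrefEq c t)) := by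
      conv_lhs => rw [(List.take_append_drop (pvPrefEq c t) t).symm]
      rw [pvSkip c (t.take (pvPrefEq c t)) (t.drop (pvPrefEq c t)) i rc ri (some s)
        (pvPrefEq_take c t)]
      congr 1
      simp [List.length_take, Nat.min_eq_left hpele]
    rw [hskip]
    cases hrest : t.drop (pvPrefEq c t) with
    | nil =>
      have hlt : t.length = pvPrefEq c t := by
        have h1 := congrArg List.length hrest
        simp [List.length_drop] at h1
        omega
      simp only [pvLoopA, pvRuns, pvLoopB, pvFinishA, Option.getD_some, hlt]
      exact pvSaveAB rc ri c s _ ((H c).symm)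
    | cons x r =>
      have hxc : x ≠ c := by
        have h2 := pvPrefEq_drop_head c t
        rw [hrest] at h2
        simpa using h2
      simp only [pvLoopA]
      have hstep : pvStepCore (rc, ri, some c, some s) (i + pvPrefEq c t) x
          = ((pvSaveB rc ri c (s, ((i + pvPrefEq c t : Nat) : Int) - 1)).1,
             (pvSaveB rc ri c (s, ((i + pvPrefEq c t : Nat) : Int) - 1)).2,
             some x, some ((i + pvPrefEq c t : Nat) : Int)) := by
        simp only [pvStepCore, Option.getD_some]
        rw [if_pos (by simpa using hxc)]
        rw [pvSaveAB rc ri c s _ ((H c).symm)]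
      rw [hstep]
      have hlen : t.length = pvPrefEq c t + 1 + r.length := by
        have h1 := congrArg List.length hrest
        simp [List.length_drop] at h1
        omega
      have hrN : r.length ≤ N := by omega
      have HK := pvSaveB_keys rc ri c (s, ((i + pvPrefEq c t : Nat) : Int) - 1) H
      rw [show i + t.length = i + pvPrefEq c t + 1 + r.length from by omega]
      rw [ih r (i + pvPrefEq c t + 1) _ _ x ((i + pvPrefEq c t : Nat) : Int) hrN HK]
      rw [pvRuns_cons x r]
      simp only [pvLoopB]
      rw [show ((i + pvPrefEq c t + 1 + pvPrefEq x r : Nat) : Int) - 1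
            = ((i + pvPrefEq c t : Nat) : Int) + ((pvPrefEq x r + 1 : Nat) : Int) - 1
          from by push_cast; ring]
      rw [show i + pvPrefEq c t + 1 + pvPrefEq x r = (i + pvPrefEq c t) + (pvPrefEq x r + 1)
          from by omega]

-- ===== VERDICT (by name: the statement is the Claim_ definition above) =====
theorem compute_rep_count_spec : Claim_equal_compute_rep_count := by
  intro labels _
  show compute_rep_count labels = compute_rep_count_alt labels
  simp only [compute_rep_count, compute_rep_count_alt, List.range_eq_range',
    PySem.List.len_eq]
  rw [pvBRA]
  have hB := pvBRB (pvRuns ((List.range' 0 labels.length).map (pvMajority labels)))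
    PySem.Dict.empty PySem.Dict.empty 0
  rw [Prod.mk.injEq] at hB
  obtain ⟨hB1, hB2⟩ := hB
  rw [hB1, hB2]
  generalize labels.length = n
  cases n with
  | zero => simp [pvLoopA, pvFinishA, pvRuns, pvLoopB]
  | succ n' =>
    rw [List.range'_succ]
    simp only [List.map_cons, pvLoopA]
    have hstep0 : pvStepCore (PySem.Dict.empty, PySem.Dict.empty, none, none) 0
        (pvMajority labels 0)
        = (PySem.Dict.empty, PySem.Dict.empty, some (pvMajority labels 0), some (0 : Int)) := by
      simp [pvStepCore]
    rw [hstep0]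
    have hms : ((List.range' 1 n').map (pvMajority labels)).length = n' := by simp
    rw [show ((n' + 1 : Nat) : Int) - 1
          = ((1 + ((List.range' 1 n').map (pvMajority labels)).length : Nat) : Int) - 1
        from by rw [hms]; push_cast; ring]
    rw [pvML n' _ 1 PySem.Dict.empty PySem.Dict.empty (pvMajority labels 0) 0
      (by simp) (fun k => rfl)]
    rw [pvRuns_cons]
    simp only [pvLoopB, Nat.cast_zero, zero_add]
    rw [show (1 + pvPrefEq (pvMajority labels 0) ((List.range' 1 n').map (pvMajority labels))
            : Nat)
          = 0 + (pvPrefEq (pvMajority labels 0) ((List.range' 1 n').map (pvMajority labels)) + 1)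
        from by omega]
    rw [show ((0 + (pvPrefEq (pvMajority labels 0) ((List.range' 1 n').map (pvMajority labels))
            + 1) : Nat) : Int) - 1
          = (0 : Int) + ((pvPrefEq (pvMajority labels 0)
              ((List.range' 1 n').map (pvMajority labels)) + 1 : Nat) : Int) - 1
        from by push_cast; ring]
    simp only [zero_add]
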